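-- pv_equiv track=rewrite | github.com/ctc316/algorithm-python | Lintcode/Ladder_all_G_OA/1628. Driving problem.py | drivingProblem
-- ===== SOURCE A (Python) =====
-- class UnionFind:
--     def __init__(self, n):
--         self.n = n
--         self.parent = [i for i in range(n + 2)]
--
--     def find(self, a):
--         path = []
--         while self.parent[a] != a:
--             path.append(a)
--             a = self.parent[a]
--
--         for p in path:
--             self.parent[p] = a
--
--         return a
--
--     def union(self, a, b):
--         root_a = self.find(a)
--         root_b = self.find(b)
--         if root_a != root_b:
--             self.parent[root_b] = root_a
--
-- def drivingProblem(L, W, p):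
--     n = len(p)
--     union = UnionFind(n)
--     for i in range(n):
--         for j in range(i + 1, n):
--             dx = (p[i][0] - p[j][0]) ** 2
--             dy = (p[i][1] - p[j][1]) ** 2
--             if dx + dy <= 36:
--                 union.union(i, j)
--
--         if p[i][1] <= 5:
--             union.union(i, n)
--
--         if W - p[i][1] <= 5:
--             union.union(i, n + 1)
--
--     return "no" if union.find(n) == union.find(n + 1) else "yes"
-- ===== SOURCE B (Python) =====
-- def drivingProblem(L, W, p):
--     n = len(p)
--     visited = [q[1] <= 5 for q in p]
--     stack = [i for i in range(n) if visited[i]]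
--     while stack:
--         i = stack.pop()
--         if W - p[i][1] <= 5:
--             return "no"
--         for j in range(n):
--             if not visited[j]:
--                 dx = p[i][0] - p[j][0]
--                 dy = p[i][1] - p[j][1]
--                 if dx * dx + dy * dy <= 36:
--                     visited[j] = True
--                     stack.append(j)
--     return "yes"
-- ===== Notes on version B (the rewrite author's own statement) =====
-- stated objective: faster
-- what changed: Replaces the union-find over all point pairs plus two virtual barrier nodes by a depth-first search seeded with all bottom points (y<=5) that returns 'no' as soon as it pops a top point (W-y<=5), so the barrier connectivity question becomes plain graph reachability; the pair scan only runs from actually reached points and stops at the first top point, instead of A's unconditional all-pairs union-find passes.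
import Mathlib
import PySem

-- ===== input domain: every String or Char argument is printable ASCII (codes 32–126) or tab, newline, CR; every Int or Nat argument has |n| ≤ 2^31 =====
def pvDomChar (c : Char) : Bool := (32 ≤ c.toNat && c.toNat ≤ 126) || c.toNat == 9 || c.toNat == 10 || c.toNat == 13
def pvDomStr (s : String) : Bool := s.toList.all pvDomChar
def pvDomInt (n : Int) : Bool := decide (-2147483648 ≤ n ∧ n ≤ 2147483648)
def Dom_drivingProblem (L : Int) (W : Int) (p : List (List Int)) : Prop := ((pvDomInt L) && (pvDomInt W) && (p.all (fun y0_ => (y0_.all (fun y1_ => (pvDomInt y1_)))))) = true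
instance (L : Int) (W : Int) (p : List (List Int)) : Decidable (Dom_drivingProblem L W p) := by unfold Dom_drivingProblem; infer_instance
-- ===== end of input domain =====

-- B replaces A's union-find over all point pairs plus two virtual barrier nodes by a depth-first
-- search seeded with all bottom points, returning "no" as soon as it pops a top point; it scans
-- pairs only from reached points and exits early (measured faster in a timing run).
-- Neither program mutates its arguments.

-- ===== PORT A =====
-- UnionFind.find: the while-loop collecting the path, with fuel = len(parent) as a pure totality
-- guard (under the forest invariant the loop always reaches a root within len(parent) steps, so
-- the guard never fires on states A reaches; proved in uf_dist_lt below).  Indices are Nats: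
-- every index Python uses here is a nonnegative in-range int (0..n+1), so Nat-indexed
-- List.getD/set is exact; p[i][k] is in range under Pre_, so getD is exact there.
def pvFindLoop (par : List Nat) (fuel : Nat) (a : Nat) (path : List Nat) : Nat × List Nat :=
  match fuel with
  | 0 => (a, path)
  | fuel + 1 =>
    if par.getD a a ≠ a then pvFindLoop par fuel (par.getD a a) (path ++ [a])
    else (a, path)

-- the second loop of find: path compression
def pvCompress (par : List Nat) (path : List Nat) (r : Nat) : List Nat :=
  path.foldl (fun q x => q.set x r) par

-- UnionFind.find returns the root and the updated parent list
def pvFind (par : List Nat) (a : Nat) : Nat × List Nat :=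
  let fr := pvFindLoop par par.length a []
  (fr.1, pvCompress par fr.2 fr.1)

-- UnionFind.union
def pvUnion (par : List Nat) (a b : Nat) : List Nat :=
  let fa := pvFind par a
  let fb := pvFind fa.2 b
  if fa.1 ≠ fb.1 then fb.2.set fb.1 fa.1 else fb.2

-- the nested for-loops of A, started from UnionFind.__init__'s parent = list(range(n + 2))
def pvLoopA (W : Int) (p : List (List Int)) : List Nat :=
  (List.range p.length).foldl (fun par i =>
    let par := (List.range' (i + 1) (p.length - (i + 1))).foldl (fun par j =>
      if ((p.getD i []).getD 0 0 - (p.getD j []).getD 0 0) ^ 2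
         + ((p.getD i []).getD 1 0 - (p.getD j []).getD 1 0) ^ 2 ≤ 36
      then pvUnion par i j else par) par
    let par := if (p.getD i []).getD 1 0 ≤ 5 then pvUnion par i p.length else par
    if W - (p.getD i []).getD 1 0 ≤ 5 then pvUnion par i (p.length + 1) else par)
    (List.range (p.length + 2))


def drivingProblem (L : Int) (W : Int) (p : List (List Int)) : String :=
  let par := pvLoopA W p
  let f1 := pvFind par p.length
  let f2 := pvFind f1.2 (p.length + 1)
  if f1.1 = f2.1 then "no" else "yes"

-- ===== PORT B =====
-- body of B's inner for-loop: visit-and-push an unvisited point within distance 6 of point i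
def pvPush (p : List (List Int)) (i : Nat) (s : List Bool × List Nat) (j : Nat) :
    List Bool × List Nat :=
  if s.1.getD j false then s
  else
    if ((p.getD i []).getD 0 0 - (p.getD j []).getD 0 0)
         * ((p.getD i []).getD 0 0 - (p.getD j []).getD 0 0)
       + ((p.getD i []).getD 1 0 - (p.getD j []).getD 1 0)
         * ((p.getD i []).getD 1 0 - (p.getD j []).getD 1 0) ≤ 36
    then (s.1.set j true, j :: s.2)
    else s

-- the while-loop of B: the Lean list head is the Python stack top (Python pushes/pops at the
-- END; the Lean stack stores it reversed, so cons/head is exactly append/pop).  fuel =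
-- (#unvisited + len(stack)) is a pure totality guard: each iteration pops one element and every
-- push marks one unvisited point visited, so the measure drops by 1 and the guard never fires.
def pvDfs (W : Int) (p : List (List Int)) (n : Nat) :
    Nat → List Bool → List Nat → String
  | _, _, [] => "yes"
  | 0, _, _ :: _ => "yes"
  | fuel + 1, vs, i :: rest =>
    if W - (p.getD i []).getD 1 0 ≤ 5 then "no"
    else pvDfs W p n fuel ((List.range n).foldl (pvPush p i) (vs, rest)).1
      ((List.range n).foldl (pvPush p i) (vs, rest)).2


def drivingProblem_alt (L : Int) (W : Int) (p : List (List Int)) : String :=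
  let n := p.length
  let vs := p.map (fun q => decide (q.getD 1 0 ≤ 5))
  let st := ((List.range n).filter (fun i => vs.getD i false)).reverse
  pvDfs W p n (vs.count false + st.length) vs st

-- ===== PRECONDITION & SPEC =====
-- Pre_ excludes exactly the inputs on which the Python A raises IndexError: a point with fewer
-- than two coordinates makes p[i][0] / p[i][1] raise.
def Pre_drivingProblem (L : Int) (W : Int) (p : List (List Int)) : Prop :=
  ∀ q ∈ p, 2 ≤ q.length
instance (L : Int) (W : Int) (p : List (List Int)) : Decidable (Pre_drivingProblem L W p) := by
  unfold Pre_drivingProblem; infer_instance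

def pvWitness_drivingProblem : Int × Int × List (List Int) :=
  (10, 8, [[1, 2], [3, 9]])

def Spec_drivingProblem (L : Int) (W : Int) (p : List (List Int)) (out : String) : Prop := out = drivingProblem_alt L W p
instance (L : Int) (W : Int) (p : List (List Int)) (out : String) : Decidable (Spec_drivingProblem L W p out) := by unfold Spec_drivingProblem; infer_instance

-- ===== CLAIM (what is proved, stated in full; the proofs are below) =====
def Claim_equal_drivingProblem : Prop := ∀ (L : Int) (W : Int) (p : List (List Int)), Dom_drivingProblem L W p → Pre_drivingProblem L W p → Spec_drivingProblem L W p (drivingProblem L W p)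

-- ===== LEMMAS AND PROOFS =====

def ufStep (par : List Nat) (a : Nat) : Nat := par.getD a a
def ufRoot (par : List Nat) (a : Nat) : Prop := ufStep par a = a
def ufRootT (par : List Nat) (a r : Nat) : Prop := ∃ k, (ufStep par)^[k] a = r ∧ ufRoot par r
def ufSame (par : List Nat) (a b : Nat) : Prop := ∃ r, ufRootT par a r ∧ ufRootT par b r
def ufInv (N : Nat) (par : List Nat) : Prop :=
  par.length = N ∧ (∀ a, a < N → ufStep par a < N) ∧ ∀ a, ∃ r, ufRootT par a r

theorem ufRoot_iterate {par : List Nat} {r : Nat} (h : ufRoot par r) (m : Nat) :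
    (ufStep par)^[m] r = r := by
  induction m with
  | zero => rfl
  | succ m ih => rw [Function.iterate_succ_apply, h, ih]

theorem ufRootT_unique {par : List Nat} {a r r' : Nat}
    (h1 : ufRootT par a r) (h2 : ufRootT par a r') : r = r' := by
  obtain ⟨k, hk, hr⟩ := h1
  obtain ⟨k', hk', hr'⟩ := h2
  rcases Nat.le_total k k' with h | h
  · rw [← hk', show k' = (k' - k) + k by omega, Function.iterate_add_apply, hk,
      ufRoot_iterate hr]
  · rw [← hk, show k = (k - k') + k' by omega, Function.iterate_add_apply, hk',
      ufRoot_iterate hr']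

theorem ufRootT_root {par : List Nat} {a : Nat} (h : ufRoot par a) : ufRootT par a a :=
  ⟨0, rfl, h⟩

theorem ufRootT_of_step {par : List Nat} {a b r : Nat}
    (hs : ufStep par a = b) (h : ufRootT par b r) : ufRootT par a r := by
  obtain ⟨k, hk, hr⟩ := h
  exact ⟨k + 1, by rw [Function.iterate_succ_apply, hs, hk], hr⟩

theorem ufRootT_isRoot {par : List Nat} {a r : Nat} (h : ufRootT par a r) : ufRoot par r := by
  obtain ⟨k, hk, hr⟩ := h; exact hr

theorem ufRootT_lt {par : List Nat} {N a r : Nat} (inv : ufInv N par) (ha : a < N)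
    (h : ufRootT par a r) : r < N := by
  obtain ⟨k, hk, -⟩ := h
  subst hk
  induction k with
  | zero => exact ha
  | succ k ih => rw [Function.iterate_succ_apply']; exact inv.2.1 _ ih

theorem ufStep_set_ne {par : List Nat} {x v a : Nat} (h : a ≠ x) :
    ufStep (par.set x v) a = ufStep par a := by
  simp [ufStep, List.getD, List.getElem?_set_ne (Ne.symm h)]

theorem ufStep_set_self {par : List Nat} {x v : Nat} (h : x < par.length) :
    ufStep (par.set x v) x = v := by
  simp [ufStep, List.getD, h]

-- the key mapping lemma: setting parent[x] := v where v is a root and x's own root rx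
-- is either v (path compression) or x itself (union of two roots)
theorem ufRootT_set {par : List Nat} {x v rx : Nat}
    (hx : x < par.length) (hv : ufRoot par v) (hxr : ufRootT par x rx)
    (hc : rx = v ∨ rx = x) :
    ∀ a r', ufRootT par a r' → ufRootT (par.set x v) a (if r' = rx then v else r') := by
  have hvroot : ufRoot (par.set x v) v := by
    by_cases hvx : v = x
    · subst hvx; exact ufStep_set_self hx
    · rw [ufRoot, ufStep_set_ne hvx]; exact hv
  have hxnew : ufRootT (par.set x v) x v :=
    ufRootT_of_step (ufStep_set_self hx) (ufRootT_root hvroot)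
  have base : ∀ a, ufRoot par a → ufRootT (par.set x v) a (if a = rx then v else a) := by
    intro a hroota
    by_cases hax : a = x
    · have hrx : rx = x := ufRootT_unique hxr (ufRootT_root (hax ▸ hroota))
      rw [if_pos (hax.trans hrx.symm), hax]; exact hxnew
    · by_cases har : a = rx
      · have hrv : rx = v := hc.resolve_right (fun h => hax (har.trans h))
        rw [if_pos har]
        have : a = v := har.trans hrv
        subst this
        exact ufRootT_root hvroot
      · rw [if_neg har]
        exact ufRootT_root (by rw [ufRoot, ufStep_set_ne hax]; exact hroota)
  intro a r' h
  obtain ⟨k, hk, hr⟩ := h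
  induction k generalizing a with
  | zero =>
    simp only [Function.iterate_zero, id] at hk
    subst hk
    exact base a hr
  | succ k ih =>
    by_cases hroota : ufRoot par a
    · have ha' : r' = a := by rw [← hk, ufRoot_iterate hroota]
      rw [ha']
      exact base a hroota
    · by_cases hax : a = x
      · have hrx : rx = r' := ufRootT_unique hxr ⟨k + 1, hax ▸ hk, hr⟩
        rw [if_pos hrx.symm, hax]
        exact hxnew
      · have hk' : (ufStep par)^[k] (ufStep par a) = r' := by
          rw [← Function.iterate_succ_apply]; exact hk
        exact ufRootT_of_step (ufStep_set_ne hax) (ih (ufStep par a) hk')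

theorem ufRootT_set_char {N : Nat} {par : List Nat} {x v rx : Nat}
    (inv : ufInv N par) (hx : x < par.length) (hv : ufRoot par v) (hxr : ufRootT par x rx)
    (hc : rx = v ∨ rx = x) (a r'' : Nat) :
    ufRootT (par.set x v) a r'' ↔
      ∃ r', ufRootT par a r' ∧ r'' = (if r' = rx then v else r') := by
  constructor
  · intro h
    obtain ⟨r', hr'⟩ := inv.2.2 a
    have := ufRootT_set hx hv hxr hc a r' hr'
    exact ⟨r', hr', (ufRootT_unique h this).symm ▸ rfl⟩
  · rintro ⟨r', hr', rfl⟩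
    exact ufRootT_set hx hv hxr hc a r' hr'

theorem ufInv_set {N : Nat} {par : List Nat} {x v rx : Nat}
    (inv : ufInv N par) (hx : x < par.length) (hv : ufRoot par v) (hvN : v < N)
    (hxr : ufRootT par x rx) (hc : rx = v ∨ rx = x) :
    ufInv N (par.set x v) := by
  refine ⟨by rw [List.length_set]; exact inv.1, ?_, ?_⟩
  · intro a ha
    by_cases hax : a = x
    · subst hax; rw [ufStep_set_self hx]; exact hvN
    · rw [ufStep_set_ne hax]; exact inv.2.1 a ha
  · intro a
    obtain ⟨r', hr'⟩ := inv.2.2 a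
    exact ⟨_, ufRootT_set hx hv hxr hc a r' hr'⟩

theorem pvFindLoop_spec {N : Nat} {par : List Nat} (inv : ufInv N par) :
    ∀ (fuel k a : Nat) (path : List Nat), k ≤ fuel → ufRoot par ((ufStep par)^[k] a) → a < N →
      ufRootT par a (pvFindLoop par fuel a path).1 ∧
      ∀ q ∈ (pvFindLoop par fuel a path).2,
        q ∈ path ∨ (q < N ∧ ufRootT par q (pvFindLoop par fuel a path).1) := by
  intro fuel
  induction fuel with
  | zero =>
    intro k a path hk hroot ha
    interval_cases k
    simp only [Function.iterate_zero, id] at hroot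
    exact ⟨ufRootT_root hroot, fun q hq => Or.inl hq⟩
  | succ fuel ih =>
    intro k a path hk hroot ha
    by_cases hra : ufRoot par a
    · have : pvFindLoop par (fuel + 1) a path = (a, path) := by
        simp [pvFindLoop, ufRoot, ufStep] at hra ⊢
        intro h; exact absurd hra h
      rw [this]
      exact ⟨ufRootT_root hra, fun q hq => Or.inl hq⟩
    · have hstep : pvFindLoop par (fuel + 1) a path
          = pvFindLoop par fuel (ufStep par a) (path ++ [a]) := by
        simp only [pvFindLoop, ufStep]
        rw [if_pos]
        exact fun h => hra h
      have hk0 : k ≠ 0 := by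
        rintro rfl
        simp only [Function.iterate_zero, id] at hroot
        exact hra hroot
      have hroot' : ufRoot par ((ufStep par)^[k - 1] (ufStep par a)) := by
        rw [← Function.iterate_succ_apply]
        show ufRoot par ((ufStep par)^[k - 1 + 1] a)
        rw [show k - 1 + 1 = k by omega]
        exact hroot
      have haN : ufStep par a < N := inv.2.1 a ha
      obtain ⟨H1, H2⟩ := ih (k - 1) (ufStep par a) (path ++ [a]) (by omega) hroot' haN
      rw [hstep]
      refine ⟨ufRootT_of_step rfl H1, fun q hq => ?_⟩
      rcases H2 q hq with hq' | hq'
      · rcases List.mem_append.mp hq' with h | h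
        · exact Or.inl h
        · rw [List.mem_singleton] at h
          subst h
          exact Or.inr ⟨ha, ufRootT_of_step rfl H1⟩
      · exact Or.inr hq'

theorem uf_iterate_lt {N : Nat} {par : List Nat} (inv : ufInv N par) {a : Nat} (ha : a < N) :
    ∀ k, (ufStep par)^[k] a < N := by
  intro k
  induction k with
  | zero => exact ha
  | succ k ih => rw [Function.iterate_succ_apply']; exact inv.2.1 _ ih

theorem uf_dist_lt {N : Nat} {par : List Nat} (inv : ufInv N par) {a : Nat} (ha : a < N) :
    ∃ k, k < N ∧ ufRoot par ((ufStep par)^[k] a) := by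
  haveI hdec : DecidablePred (fun k => ufRoot par ((ufStep par)^[k] a)) :=
    fun k => Nat.decEq _ _
  have hex : ∃ k, ufRoot par ((ufStep par)^[k] a) := by
    obtain ⟨r, k, hk, hr⟩ := inv.2.2 a
    exact ⟨k, hk ▸ hr⟩
  refine ⟨Nat.find hex, ?_, Nat.find_spec hex⟩
  set d := Nat.find hex with hd
  have inj : ∀ i j : Nat, i < j → j ≤ d → (ufStep par)^[i] a = (ufStep par)^[j] a → False := by
    intro i j hij hjd heq
    have : ufRoot par ((ufStep par)^[(d - j) + i] a) := by
      rw [Function.iterate_add_apply, heq, ← Function.iterate_add_apply,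
        show d - j + j = d by omega]
      exact Nat.find_spec hex
    exact Nat.find_min hex (by omega) this
  have hinj : Function.Injective (fun i : Fin (d + 1) => (⟨(ufStep par)^[i] a, uf_iterate_lt inv ha i⟩ : Fin N)) := by
    intro i j h
    simp only [Fin.mk.injEq] at h
    by_contra hne
    rcases Nat.lt_or_ge i.1 j.1 with hlt | hge
    · exact inj i j hlt (by omega) h
    · have : j.1 < i.1 := by
        rcases Nat.lt_or_ge j.1 i.1 with h' | h'
        · exact h'
        · exact absurd (Fin.ext (by omega)) hne
      exact inj j i this (by omega) h.symm
  have := Fintype.card_le_of_injective _ hinj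
  simp at this
  omega

theorem pvCompress_spec {N r : Nat} :
    ∀ (path : List Nat) (par : List Nat), ufInv N par → (∀ q ∈ path, q < N ∧ ufRootT par q r) →
      ufInv N (pvCompress par path r) ∧
      (∀ b r', ufRootT par b r' ↔ ufRootT (pvCompress par path r) b r') := by
  intro path
  induction path with
  | nil => exact fun par inv _ => ⟨inv, fun b r' => Iff.rfl⟩
  | cons q path ih =>
    intro par inv hpath
    obtain ⟨hqN, hqr⟩ := hpath q List.mem_cons_self
    have hv : ufRoot par r := ufRootT_isRoot hqr
    have hrN : r < N := ufRootT_lt inv hqN hqr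
    have hx : q < par.length := inv.1 ▸ hqN
    have hchar := fun b r'' => ufRootT_set_char inv hx hv hqr (Or.inl rfl) b r''
    have hfwd : ∀ b r', ufRootT par b r' → ufRootT (par.set q r) b r' := by
      intro b r' h
      refine (hchar b r').mpr ⟨r', h, ?_⟩
      by_cases h' : r' = r
      · rw [if_pos h', h']
      · rw [if_neg h']
    have hbwd : ∀ b r', ufRootT (par.set q r) b r' → ufRootT par b r' := by
      intro b r' h
      obtain ⟨r0, h0, he⟩ := (hchar b r').mp h
      by_cases h' : r0 = r
      · rw [if_pos h'] at he; rw [he, ← h']; exact h0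
      · rw [if_neg h'] at he; rw [he]; exact h0
    have inv' : ufInv N (par.set q r) := ufInv_set inv hx hv hrN hqr (Or.inl rfl)
    have hpath' : ∀ q' ∈ path, q' < N ∧ ufRootT (par.set q r) q' r := by
      intro q' hq'
      obtain ⟨h1, h2⟩ := hpath q' (List.mem_cons_of_mem _ hq')
      exact ⟨h1, hfwd _ _ h2⟩
    obtain ⟨invF, hiffF⟩ := ih (par.set q r) inv' hpath'
    have hc : pvCompress par (q :: path) r = pvCompress (par.set q r) path r := by
      simp [pvCompress]
    rw [hc]
    exact ⟨invF, fun b r' => ⟨fun h => (hiffF b r').mp (hfwd b r' h),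
      fun h => hbwd b r' ((hiffF b r').mpr h)⟩⟩

theorem pvFind_spec {N : Nat} {par : List Nat} (inv : ufInv N par) {a : Nat} (ha : a < N) :
    ufRootT par a (pvFind par a).1 ∧ ufInv N (pvFind par a).2 ∧
      (∀ b r', ufRootT par b r' ↔ ufRootT (pvFind par a).2 b r') := by
  obtain ⟨k, hkN, hk⟩ := uf_dist_lt inv ha
  have hklen : k ≤ par.length := by rw [inv.1]; omega
  obtain ⟨H1, H2⟩ := pvFindLoop_spec inv par.length k a [] hklen hk ha
  have hpath : ∀ q ∈ (pvFindLoop par par.length a []).2,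
      q < N ∧ ufRootT par q (pvFindLoop par par.length a []).1 := by
    intro q hq
    rcases H2 q hq with h | h
    · exact absurd h (List.not_mem_nil)
    · exact h
  obtain ⟨invF, hiffF⟩ := pvCompress_spec _ par inv hpath
  exact ⟨H1, invF, hiffF⟩

theorem ufSame_symm {par : List Nat} {a b : Nat} (h : ufSame par a b) : ufSame par b a := by
  obtain ⟨r, h1, h2⟩ := h; exact ⟨r, h2, h1⟩

theorem ufSame_trans {par : List Nat} {a b c : Nat} (h1 : ufSame par a b)
    (h2 : ufSame par b c) : ufSame par a c := by
  obtain ⟨r, ha, hb⟩ := h1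
  obtain ⟨r', hb', hc⟩ := h2
  exact ⟨r, ha, (ufRootT_unique hb' hb) ▸ hc⟩

theorem ufSame_iff_roots {par : List Nat} {x y rx ry : Nat}
    (hX : ufRootT par x rx) (hY : ufRootT par y ry) : ufSame par x y ↔ rx = ry := by
  constructor
  · rintro ⟨r, h1, h2⟩
    rw [ufRootT_unique hX h1, ufRootT_unique hY h2]
  · intro h
    exact ⟨rx, hX, h ▸ hY⟩

theorem pvUnion_spec {N : Nat} {par : List Nat} (inv : ufInv N par) {a b : Nat}
    (ha : a < N) (hb : b < N) :
    ufInv N (pvUnion par a b) ∧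
    ∀ x y, ufSame (pvUnion par a b) x y ↔
      (ufSame par x y ∨ (ufSame par x a ∧ ufSame par b y) ∨ (ufSame par x b ∧ ufSame par a y)) := by
  obtain ⟨hra, inv1, hiff1⟩ := pvFind_spec inv ha
  obtain ⟨hrb1, inv2, hiff2⟩ := pvFind_spec inv1 (a := b) hb
  set ra := (pvFind par a).1 with hraeq
  set par1 := (pvFind par a).2 with hpar1
  set rb := (pvFind par1 b).1 with hrbeq
  set par2 := (pvFind par1 b).2 with hpar2
  have hiff : ∀ c r, ufRootT par c r ↔ ufRootT par2 c r :=
    fun c r => (hiff1 c r).trans (hiff2 c r)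
  have hSiff : ∀ c d, ufSame par c d ↔ ufSame par2 c d := by
    intro c d
    exact exists_congr fun r => and_congr (hiff c r) (hiff d r)
  have hrb : ufRootT par b rb := (hiff1 b rb).mpr hrb1
  have hra2 : ufRootT par2 a ra := (hiff a ra).mp hra
  have hrb2 : ufRootT par2 b rb := (hiff b rb).mp hrb
  have hraN : ra < N := ufRootT_lt inv ha hra
  have hrbN : rb < N := ufRootT_lt inv hb hrb
  have hresult : pvUnion par a b = if ra ≠ rb then par2.set rb ra else par2 := rfl
  by_cases hEq : ra = rb
  · rw [hresult, if_neg (by simp [hEq])]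
    refine ⟨inv2, fun x y => ?_⟩
    rw [← hSiff]
    have hab : ufSame par a b := ⟨ra, hra, hEq ▸ hrb⟩
    constructor
    · exact Or.inl
    · rintro (h | ⟨h1, h2⟩ | ⟨h1, h2⟩)
      · exact h
      · exact ufSame_trans (ufSame_trans h1 hab) h2
      · exact ufSame_trans (ufSame_trans h1 (ufSame_symm hab)) h2
  · rw [hresult, if_pos hEq]
    have hx : rb < par2.length := inv2.1 ▸ hrbN
    have hv : ufRoot par2 ra := ufRootT_isRoot hra2
    have hxr : ufRootT par2 rb rb := ufRootT_root (ufRootT_isRoot hrb2)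
    have hchar := fun c r'' => ufRootT_set_char inv2 hx hv hxr (Or.inr rfl) c r''
    have inv3 : ufInv N (par2.set rb ra) := ufInv_set inv2 hx hv hraN hxr (Or.inr rfl)
    refine ⟨inv3, fun x y => ?_⟩
    obtain ⟨rx, hrx⟩ := inv2.2.2 x
    obtain ⟨ry, hry⟩ := inv2.2.2 y
    have hrxp : ufRootT par x rx := (hiff x rx).mpr hrx
    have hryp : ufRootT par y ry := (hiff y ry).mpr hry
    have hL : ufSame (par2.set rb ra) x y ↔
        (if rx = rb then ra else rx) = (if ry = rb then ra else ry) :=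
      ufSame_iff_roots (ufRootT_set hx hv hxr (Or.inr rfl) x rx hrx)
        (ufRootT_set hx hv hxr (Or.inr rfl) y ry hry)
    rw [hL, ufSame_iff_roots hrxp hryp, ufSame_iff_roots hrxp hra,
      ufSame_iff_roots hrb hryp, ufSame_iff_roots hrxp hrb, ufSame_iff_roots hra hryp]
    by_cases h1 : rx = rb <;> by_cases h2 : ry = rb <;> simp [h1, h2] <;> omega

def pvX (p : List (List Int)) (i : Nat) : Int := (p.getD i []).getD 0 0
def pvY (p : List (List Int)) (i : Nat) : Int := (p.getD i []).getD 1 0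
def pvCloseB (p : List (List Int)) (i j : Nat) : Bool :=
  decide ((pvX p i - pvX p j) ^ 2 + (pvY p i - pvY p j) ^ 2 ≤ 36)

def relOf (es : List (Nat × Nat)) (x y : Nat) : Prop := (x, y) ∈ es
def procE (par : List Nat) (es : List (Nat × Nat)) : List Nat :=
  es.foldl (fun par e => pvUnion par e.1 e.2) par

def edgesFor (W : Int) (p : List (List Int)) (i : Nat) : List (Nat × Nat) :=
  ((List.range' (i + 1) (p.length - (i + 1))).filter (fun j => pvCloseB p i j)).map (fun j => (i, j))
  ++ (if pvY p i ≤ 5 then [(i, p.length)] else [])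
  ++ (if W - pvY p i ≤ 5 then [(i, p.length + 1)] else [])

def pvEdges (W : Int) (p : List (List Int)) : List (Nat × Nat) :=
  (List.range p.length).flatMap (edgesFor W p)

theorem eqvGen_relOf_nil {x y : Nat} : Relation.EqvGen (relOf []) x y ↔ x = y := by
  constructor
  · intro h
    induction h with
    | rel u v h => exact absurd h (List.not_mem_nil)
    | refl u => rfl
    | symm u v _ ih => exact ih.symm
    | trans u v w _ _ ih1 ih2 => exact ih1.trans ih2
  · rintro rfl
    exact Relation.EqvGen.refl x

theorem eqvGen_congr {R S : Nat → Nat → Prop} (h : ∀ u v, R u v ↔ S u v) {x y : Nat} :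
    Relation.EqvGen R x y ↔ Relation.EqvGen S x y :=
  ⟨Relation.EqvGen.mono (fun u v => (h u v).mp), Relation.EqvGen.mono (fun u v => (h u v).mpr)⟩

theorem eqvGen_sup_pair {R : Nat → Nat → Prop} {a b x y : Nat} :
    Relation.EqvGen (fun u v => R u v ∨ (u = a ∧ v = b)) x y ↔
      (Relation.EqvGen R x y ∨ (Relation.EqvGen R x a ∧ Relation.EqvGen R b y) ∨
        (Relation.EqvGen R x b ∧ Relation.EqvGen R a y)) := by
  constructor
  · intro h
    induction h with
    | rel u v h =>
      rcases h with h | ⟨rfl, rfl⟩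
      · exact Or.inl (Relation.EqvGen.rel _ _ h)
      · exact Or.inr (Or.inl ⟨Relation.EqvGen.refl _, Relation.EqvGen.refl _⟩)
    | refl u => exact Or.inl (Relation.EqvGen.refl u)
    | symm u v _ ih =>
      rcases ih with h | ⟨h1, h2⟩ | ⟨h1, h2⟩
      · exact Or.inl (h.symm _ _)
      · exact Or.inr (Or.inr ⟨h2.symm _ _, h1.symm _ _⟩)
      · exact Or.inr (Or.inl ⟨h2.symm _ _, h1.symm _ _⟩)
    | trans u v w _ _ ih1 ih2 =>
      rcases ih1 with h | ⟨h1, h2⟩ | ⟨h1, h2⟩ <;> rcases ih2 with g | ⟨g1, g2⟩ | ⟨g1, g2⟩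
      · exact Or.inl (h.trans _ _ _ g)
      · exact Or.inr (Or.inl ⟨(h.trans _ _ _ g1), g2⟩)
      · exact Or.inr (Or.inr ⟨(h.trans _ _ _ g1), g2⟩)
      · exact Or.inr (Or.inl ⟨h1, h2.trans _ _ _ g⟩)
      · exact Or.inr (Or.inl ⟨h1, g2⟩)
      · exact Or.inl (h1.trans _ _ _ g2)
      · exact Or.inr (Or.inr ⟨h1, h2.trans _ _ _ g⟩)
      · exact Or.inl (h1.trans _ _ _ g2)
      · exact Or.inr (Or.inr ⟨h1, g2⟩)
  · have hmono : ∀ {u v}, Relation.EqvGen R u v →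
        Relation.EqvGen (fun u v => R u v ∨ (u = a ∧ v = b)) u v :=
      fun h => Relation.EqvGen.mono (fun u v h' => Or.inl h') h
    have hab : Relation.EqvGen (fun u v => R u v ∨ (u = a ∧ v = b)) a b :=
      Relation.EqvGen.rel _ _ (Or.inr ⟨rfl, rfl⟩)
    rintro (h | ⟨h1, h2⟩ | ⟨h1, h2⟩)
    · exact hmono h
    · exact ((hmono h1).trans _ _ _ hab).trans _ _ _ (hmono h2)
    · exact ((hmono h1).trans _ _ _ (hab.symm _ _)).trans _ _ _ (hmono h2)

theorem relOf_append_pair {es : List (Nat × Nat)} {a b u v : Nat} :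
    relOf (es ++ [(a, b)]) u v ↔ (relOf es u v ∨ (u = a ∧ v = b)) := by
  simp [relOf]

theorem procE_append (par : List Nat) (l1 l2 : List (Nat × Nat)) :
    procE par (l1 ++ l2) = procE (procE par l1) l2 :=
  List.foldl_append

theorem procE_spec {N : Nat} :
    ∀ (es E0 : List (Nat × Nat)) (par : List Nat), ufInv N par →
      (∀ e ∈ es, e.1 < N ∧ e.2 < N) →
      (∀ x y, ufSame par x y ↔ Relation.EqvGen (relOf E0) x y) →
      ufInv N (procE par es) ∧
        ∀ x y, ufSame (procE par es) x y ↔ Relation.EqvGen (relOf (E0 ++ es)) x y := by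
  intro es
  induction es with
  | nil => intro E0 par inv _ hchar; simpa [procE] using ⟨inv, hchar⟩
  | cons e es ih =>
    intro E0 par inv hes hchar
    have he := hes e List.mem_cons_self
    have hes' : ∀ e' ∈ es, e'.1 < N ∧ e'.2 < N := fun e' h => hes e' (List.mem_cons_of_mem _ h)
    obtain ⟨inv', hchar'⟩ := pvUnion_spec inv he.1 he.2
    have hchar'' : ∀ x y, ufSame (pvUnion par e.1 e.2) x y ↔
        Relation.EqvGen (relOf (E0 ++ [e])) x y := by
      intro x y
      rw [hchar' x y, hchar x y, hchar x e.1, hchar e.2 y, hchar x e.2, hchar e.1 y]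
      rw [eqvGen_congr (fun u v => relOf_append_pair (es := E0) (a := e.1) (b := e.2))]
      exact eqvGen_sup_pair.symm
    have : procE par (e :: es) = procE (pvUnion par e.1 e.2) es := by
      simp [procE]
    rw [this]
    obtain ⟨invF, hF⟩ := ih (E0 ++ [e]) _ inv' hes' hchar''
    refine ⟨invF, fun x y => ?_⟩
    rw [hF x y]
    apply eqvGen_congr
    intro u v
    simp [relOf]

theorem ufStep_range (N a : Nat) : ufStep (List.range N) a = a := by
  by_cases h : a < N
  · simp [ufStep, List.getD, List.getElem?_range, h]
  · rw [ufStep, List.getD_eq_default]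
    rw [List.length_range]; omega

theorem ufInv_range (N : Nat) : ufInv N (List.range N) := by
  refine ⟨List.length_range, fun a ha => ?_, fun a => ?_⟩
  · rw [ufStep_range]; exact ha
  · exact ⟨a, 0, rfl, ufStep_range N a⟩

theorem ufSame_range (N x y : Nat) : ufSame (List.range N) x y ↔ x = y := by
  have hfix : ∀ (k z : Nat), (ufStep (List.range N))^[k] z = z := by
    intro k z
    induction k with
    | zero => rfl
    | succ k ih => rw [Function.iterate_succ_apply, ufStep_range]; exact ih
  constructor
  · rintro ⟨r, ⟨k, hk, -⟩, ⟨k', hk', -⟩⟩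
    rw [hfix k x] at hk
    rw [hfix k' y] at hk'
    rw [hk, hk']
  · rintro rfl
    exact ⟨x, ⟨0, rfl, ufStep_range N x⟩, ⟨0, rfl, ufStep_range N x⟩⟩

theorem foldl_if_union (p : List (List Int)) (i : Nat) :
    ∀ (js : List Nat) (par : List Nat),
      js.foldl (fun par j =>
        if ((p.getD i []).getD 0 0 - (p.getD j []).getD 0 0) ^ 2
           + ((p.getD i []).getD 1 0 - (p.getD j []).getD 1 0) ^ 2 ≤ 36
        then pvUnion par i j else par) par
      = procE par ((js.filter (fun j => pvCloseB p i j)).map (fun j => (i, j))) := by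
  intro js
  induction js with
  | nil => intro par; rfl
  | cons j js ih =>
    intro par
    rw [List.foldl_cons]
    by_cases h : ((p.getD i []).getD 0 0 - (p.getD j []).getD 0 0) ^ 2
        + ((p.getD i []).getD 1 0 - (p.getD j []).getD 1 0) ^ 2 ≤ 36
    · rw [if_pos h, ih]
      have hc : pvCloseB p i j = true := by
        simp only [pvCloseB, pvX, pvY, decide_eq_true_eq]
        exact h
      simp [List.filter_cons, hc, procE]
    · rw [if_neg h, ih]
      have hc : pvCloseB p i j = false := by
        simp only [pvCloseB, pvX, pvY, decide_eq_false_iff_not]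
        exact h
      simp [List.filter_cons, hc]

theorem procE_ite (par : List Nat) (c : Prop) [Decidable c] (a b : Nat) :
    (if c then pvUnion par a b else par) = procE par (if c then [(a, b)] else []) := by
  by_cases h : c <;> simp [h, procE]

theorem foldl_procE (g : Nat → List (Nat × Nat)) :
    ∀ (l : List Nat) (par : List Nat),
      l.foldl (fun par i => procE par (g i)) par = procE par (l.flatMap g) := by
  intro l
  induction l with
  | nil => intro par; rfl
  | cons i l ih =>
    intro par
    rw [List.foldl_cons, ih, List.flatMap_cons, procE_append]

theorem pvLoopA_eq (W : Int) (p : List (List Int)) :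
    pvLoopA W p = procE (List.range (p.length + 2)) (pvEdges W p) := by
  unfold pvLoopA pvEdges
  rw [← foldl_procE (edgesFor W p)]
  congr 1
  funext par i
  rw [foldl_if_union]
  simp only [edgesFor]
  rw [procE_append, procE_append, procE_ite, procE_ite]
  rw [pvY]

theorem pvEdges_bounds {W : Int} {p : List (List Int)} :
    ∀ e ∈ pvEdges W p, e.1 < p.length + 2 ∧ e.2 < p.length + 2 := by
  intro e he
  simp only [pvEdges, List.mem_flatMap, List.mem_range] at he
  obtain ⟨i, hi, hmem⟩ := he
  simp only [edgesFor, List.mem_append, List.mem_map, List.mem_filter,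
    List.mem_range'_1] at hmem
  rcases hmem with (⟨j, ⟨⟨hj1, hj2⟩, -⟩, rfl⟩ | h) | h
  · constructor <;> simp <;> omega
  · rcases h' : (pvY p i ≤ 5 : Prop) with _
    by_cases hb : pvY p i ≤ 5
    · rw [if_pos hb] at h
      rw [List.mem_singleton] at h
      subst h
      constructor <;> simp <;> omega
    · rw [if_neg hb] at h
      exact absurd h (List.not_mem_nil)
  · by_cases hb : W - pvY p i ≤ 5
    · rw [if_pos hb] at h
      rw [List.mem_singleton] at h
      subst h
      constructor <;> simp <;> omega
    · rw [if_neg hb] at h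
      exact absurd h (List.not_mem_nil)

theorem A_char (L W : Int) (p : List (List Int)) :
    (drivingProblem L W p = "no" ↔
      Relation.EqvGen (relOf (pvEdges W p)) p.length (p.length + 1))
    ∧ (drivingProblem L W p = "no" ∨ drivingProblem L W p = "yes") := by
  have hn2 : p.length < p.length + 2 := by omega
  have hn2' : p.length + 1 < p.length + 2 := by omega
  obtain ⟨invF, hcharF⟩ := procE_spec (N := p.length + 2) (pvEdges W p) [] _
    (ufInv_range _) pvEdges_bounds
    (fun x y => (ufSame_range _ x y).trans eqvGen_relOf_nil.symm)
  rw [← pvLoopA_eq] at invF hcharF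
  simp only [List.nil_append] at hcharF
  obtain ⟨hr1, inv1, hiff1⟩ := pvFind_spec invF hn2
  obtain ⟨hr2, inv2, hiff2⟩ := pvFind_spec inv1 (a := p.length + 1) hn2'
  have hr2' : ufRootT (pvLoopA W p) (p.length + 1) (pvFind (pvFind (pvLoopA W p) p.length).2 (p.length + 1)).1 :=
    (hiff1 _ _).mpr hr2
  have hSame := ufSame_iff_roots hr1 hr2'
  have hres : drivingProblem L W p =
      if (pvFind (pvLoopA W p) p.length).1
        = (pvFind (pvFind (pvLoopA W p) p.length).2 (p.length + 1)).1
      then "no" else "yes" := rfl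
  rw [hres, ← hcharF]
  by_cases h : (pvFind (pvLoopA W p) p.length).1
      = (pvFind (pvFind (pvLoopA W p) p.length).2 (p.length + 1)).1
  · rw [if_pos h]
    exact ⟨⟨fun _ => hSame.mpr h, fun _ => rfl⟩, Or.inl rfl⟩
  · rw [if_neg h]
    exact ⟨⟨fun hcon => absurd hcon (by decide), fun hs => absurd (hSame.mp hs) h⟩, Or.inr rfl⟩

def pvAdj (p : List (List Int)) (i j : Nat) : Prop :=
  i < p.length ∧ j < p.length ∧ pvCloseB p i j = true
def pvReach (p : List (List Int)) : Nat → Nat → Prop := Relation.ReflTransGen (pvAdj p)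
def pvBot (p : List (List Int)) (i : Nat) : Prop := i < p.length ∧ pvY p i ≤ 5
def pvTop (W : Int) (p : List (List Int)) (i : Nat) : Prop := i < p.length ∧ W - pvY p i ≤ 5
def pvConn (W : Int) (p : List (List Int)) : Prop :=
  ∃ i j, pvBot p i ∧ pvTop W p j ∧ pvReach p i j
def pvRB (p : List (List Int)) (x : Nat) : Prop := ∃ s, pvBot p s ∧ pvReach p s x
def pvRT (W : Int) (p : List (List Int)) (x : Nat) : Prop := ∃ t, pvTop W p t ∧ pvReach p x t
def pvXB (p : List (List Int)) (x : Nat) : Prop := x = p.length ∨ (x < p.length ∧ pvRB p x)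
def pvXT (W : Int) (p : List (List Int)) (x : Nat) : Prop :=
  x = p.length + 1 ∨ (x < p.length ∧ pvRT W p x)
def pvRstar (W : Int) (p : List (List Int)) (x y : Nat) : Prop :=
  x = y ∨ (x < p.length ∧ y < p.length ∧ pvReach p x y)
    ∨ (pvXB p x ∧ pvXB p y) ∨ (pvXT W p x ∧ pvXT W p y)

theorem pvCloseB_symm (p : List (List Int)) (i j : Nat) : pvCloseB p i j = pvCloseB p j i := by
  simp only [pvCloseB]
  rw [decide_eq_decide]
  have e1 : (pvX p i - pvX p j) ^ 2 = (pvX p j - pvX p i) ^ 2 := by ring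
  have e2 : (pvY p i - pvY p j) ^ 2 = (pvY p j - pvY p i) ^ 2 := by ring
  rw [e1, e2]

theorem pvAdj_symm {p : List (List Int)} {i j : Nat} (h : pvAdj p i j) : pvAdj p j i :=
  ⟨h.2.1, h.1, (pvCloseB_symm p j i).trans h.2.2⟩

theorem pvReach_symm {p : List (List Int)} {i j : Nat} (h : pvReach p i j) : pvReach p j i := by
  induction h with
  | refl => exact Relation.ReflTransGen.refl
  | tail _ hadj ih => exact Relation.ReflTransGen.head (pvAdj_symm hadj) ih

theorem pvRB_mono {p : List (List Int)} {x y : Nat} (h : pvRB p x) (hr : pvReach p x y) :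
    pvRB p y := by
  obtain ⟨s, hs, hsx⟩ := h
  exact ⟨s, hs, hsx.trans hr⟩

theorem pvRT_mono {W : Int} {p : List (List Int)} {x y : Nat} (hr : pvReach p x y)
    (h : pvRT W p y) : pvRT W p x := by
  obtain ⟨t, ht, hyt⟩ := h
  exact ⟨t, ht, hr.trans hyt⟩

theorem pvRB_RT_conn {W : Int} {p : List (List Int)} {x : Nat} (h1 : pvRB p x)
    (h2 : pvRT W p x) : pvConn W p := by
  obtain ⟨s, hs, hsx⟩ := h1
  obtain ⟨t, ht, hxt⟩ := h2
  exact ⟨s, t, hs, ht, hsx.trans hxt⟩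

theorem mem_pvEdges {W : Int} {p : List (List Int)} {a b : Nat} :
    (a, b) ∈ pvEdges W p ↔
      ((a < p.length ∧ b < p.length ∧ a < b ∧ pvCloseB p a b = true)
        ∨ (a < p.length ∧ b = p.length ∧ pvY p a ≤ 5)
        ∨ (a < p.length ∧ b = p.length + 1 ∧ W - pvY p a ≤ 5)) := by
  simp only [pvEdges, List.mem_flatMap, List.mem_range, edgesFor, List.mem_append,
    List.mem_map, List.mem_filter, List.mem_range'_1]
  constructor
  · rintro ⟨i, hi, (⟨j, ⟨⟨hj1, hj2⟩, hc⟩, he⟩ | h) | h⟩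
    · obtain ⟨rfl, rfl⟩ := Prod.mk.injEq .. ▸ he
      exact Or.inl ⟨hi, by omega, by omega, hc⟩
    · by_cases hb : pvY p i ≤ 5
      · rw [if_pos hb, List.mem_singleton] at h
        obtain ⟨rfl, rfl⟩ := Prod.mk.injEq .. ▸ h
        exact Or.inr (Or.inl ⟨hi, rfl, hb⟩)
      · rw [if_neg hb] at h
        exact absurd h (List.not_mem_nil)
    · by_cases hb : W - pvY p i ≤ 5
      · rw [if_pos hb, List.mem_singleton] at h
        obtain ⟨rfl, rfl⟩ := Prod.mk.injEq .. ▸ h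
        exact Or.inr (Or.inr ⟨hi, rfl, hb⟩)
      · rw [if_neg hb] at h
        exact absurd h (List.not_mem_nil)
  · rintro (⟨ha, hb, hab, hc⟩ | ⟨ha, rfl, hy⟩ | ⟨ha, rfl, hy⟩)
    · exact ⟨a, ha, Or.inl (Or.inl ⟨b, ⟨⟨by omega, by omega⟩, hc⟩, rfl⟩)⟩
    · exact ⟨a, ha, Or.inl (Or.inr (by rw [if_pos hy]; exact List.mem_singleton.mpr rfl))⟩
    · exact ⟨a, ha, Or.inr (by rw [if_pos hy]; exact List.mem_singleton.mpr rfl)⟩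

theorem reach_to_eqvGen {W : Int} {p : List (List Int)} {i j : Nat} (h : pvReach p i j) :
    Relation.EqvGen (relOf (pvEdges W p)) i j := by
  induction h with
  | refl => exact Relation.EqvGen.refl _
  | tail _ hadj ih =>
    rename_i c d _
    obtain ⟨hc, hd, hcd⟩ := hadj
    refine ih.trans _ _ _ ?_
    rcases Nat.lt_trichotomy c d with hlt | rfl | hlt
    · exact Relation.EqvGen.rel _ _ (mem_pvEdges.mpr (Or.inl ⟨hc, hd, hlt, hcd⟩))
    · exact Relation.EqvGen.refl _
    · exact (Relation.EqvGen.rel _ _ (mem_pvEdges.mpr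
        (Or.inl ⟨hd, hc, hlt, (pvCloseB_symm p d c).trans hcd⟩))).symm _ _

theorem conn_to_eqvGen {W : Int} {p : List (List Int)} (h : pvConn W p) :
    Relation.EqvGen (relOf (pvEdges W p)) p.length (p.length + 1) := by
  obtain ⟨i, j, hb, ht, hr⟩ := h
  have e1 : Relation.EqvGen (relOf (pvEdges W p)) i p.length :=
    Relation.EqvGen.rel _ _ (mem_pvEdges.mpr (Or.inr (Or.inl ⟨hb.1, rfl, hb.2⟩)))
  have e2 : Relation.EqvGen (relOf (pvEdges W p)) j (p.length + 1) :=
    Relation.EqvGen.rel _ _ (mem_pvEdges.mpr (Or.inr (Or.inr ⟨ht.1, rfl, ht.2⟩)))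
  exact ((e1.symm _ _).trans _ _ _ (reach_to_eqvGen hr)).trans _ _ _ e2

theorem rstar_of_eqvGen {W : Int} {p : List (List Int)} (hP : ¬pvConn W p) {x y : Nat}
    (h : Relation.EqvGen (relOf (pvEdges W p)) x y) : pvRstar W p x y := by
  induction h with
  | rel u v h =>
    rcases mem_pvEdges.mp h with ⟨hu, hv, -, hc⟩ | ⟨hu, rfl, hy⟩ | ⟨hu, rfl, hy⟩
    · exact Or.inr (Or.inl ⟨hu, hv, Relation.ReflTransGen.single ⟨hu, hv, hc⟩⟩)
    · exact Or.inr (Or.inr (Or.inl ⟨Or.inr ⟨hu, u, ⟨hu, hy⟩, Relation.ReflTransGen.refl⟩,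
        Or.inl rfl⟩))
    · exact Or.inr (Or.inr (Or.inr ⟨Or.inr ⟨hu, u, ⟨hu, hy⟩, Relation.ReflTransGen.refl⟩,
        Or.inl rfl⟩))
  | refl u => exact Or.inl rfl
  | symm u v _ ih =>
    rcases ih with rfl | ⟨h1, h2, h3⟩ | ⟨h1, h2⟩ | ⟨h1, h2⟩
    · exact Or.inl rfl
    · exact Or.inr (Or.inl ⟨h2, h1, pvReach_symm h3⟩)
    · exact Or.inr (Or.inr (Or.inl ⟨h2, h1⟩))
    · exact Or.inr (Or.inr (Or.inr ⟨h2, h1⟩))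
  | trans u v w _ _ ih1 ih2 =>
    rcases ih1 with rfl | ⟨hu, hv, hr⟩ | ⟨hb1, hb2⟩ | ⟨ht1, ht2⟩
    · exact ih2
    · rcases ih2 with rfl | ⟨hv', hw, hr'⟩ | ⟨hb1', hb2'⟩ | ⟨ht1', ht2'⟩
      · exact Or.inr (Or.inl ⟨hu, hv, hr⟩)
      · exact Or.inr (Or.inl ⟨hu, hw, hr.trans hr'⟩)
      · -- v in XB: v < p.length so pvRB v; pull back along hr
        rcases hb1' with rfl | ⟨-, hrb⟩
        · omega
        · exact Or.inr (Or.inr (Or.inl ⟨Or.inr ⟨hu, pvRB_mono hrb (pvReach_symm hr)⟩, hb2'⟩))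
      · rcases ht1' with rfl | ⟨-, hrt⟩
        · omega
        · exact Or.inr (Or.inr (Or.inr ⟨Or.inr ⟨hu, pvRT_mono hr hrt⟩, ht2'⟩))
    · rcases ih2 with rfl | ⟨hv', hw, hr'⟩ | ⟨hb1', hb2'⟩ | ⟨ht1', ht2'⟩
      · exact Or.inr (Or.inr (Or.inl ⟨hb1, hb2⟩))
      · rcases hb2 with rfl | ⟨-, hrb⟩
        · omega
        · exact Or.inr (Or.inr (Or.inl ⟨hb1, Or.inr ⟨hw, pvRB_mono hrb hr'⟩⟩))
      · exact Or.inr (Or.inr (Or.inl ⟨hb1, hb2'⟩))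
      · -- v is both XB and XT: contradiction with ¬pvConn
        exfalso
        rcases hb2 with rfl | ⟨hvlt, hrb⟩
        · rcases ht1' with h' | ⟨h', -⟩ <;> omega
        · rcases ht1' with rfl | ⟨-, hrt⟩
          · omega
          · exact hP (pvRB_RT_conn hrb hrt)
    · rcases ih2 with rfl | ⟨hv', hw, hr'⟩ | ⟨hb1', hb2'⟩ | ⟨ht1', ht2'⟩
      · exact Or.inr (Or.inr (Or.inr ⟨ht1, ht2⟩))
      · rcases ht2 with rfl | ⟨-, hrt⟩
        · omega
        · exact Or.inr (Or.inr (Or.inr ⟨ht1, Or.inr ⟨hw, pvRT_mono (pvReach_symm hr') hrt⟩⟩))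
      · exfalso
        rcases ht2 with rfl | ⟨hvlt, hrt⟩
        · rcases hb1' with h' | ⟨h', -⟩ <;> omega
        · rcases hb1' with rfl | ⟨-, hrb⟩
          · omega
          · exact hP (pvRB_RT_conn hrb hrt)
      · exact Or.inr (Or.inr (Or.inr ⟨ht1, ht2'⟩))

theorem eqvGen_to_conn {W : Int} {p : List (List Int)}
    (h : Relation.EqvGen (relOf (pvEdges W p)) p.length (p.length + 1)) : pvConn W p := by
  by_cases hP : pvConn W p
  · exact hP
  · exfalso
    rcases rstar_of_eqvGen hP h with heq | ⟨h1, -⟩ | ⟨-, hb⟩ | ⟨ht, -⟩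
    · omega
    · omega
    · rcases hb with h' | ⟨h', -⟩ <;> omega
    · rcases ht with h' | ⟨h', -⟩ <;> omega

theorem getD_set_ne' {α : Type} (l : List α) (x j : Nat) (v d : α) (h : j ≠ x) :
    (l.set x v).getD j d = l.getD j d := by
  simp [List.getD, List.getElem?_set_ne (Ne.symm h)]

theorem getD_set_self' {α : Type} (l : List α) (x : Nat) (v d : α) (h : x < l.length) :
    (l.set x v).getD x d = v := by
  simp [List.getD, h]

theorem count_false_set : ∀ (l : List Bool) (j : Nat), j < l.length → l.getD j false = false →
    (l.set j true).count false + 1 = l.count false := by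
  intro l
  induction l with
  | nil => intro j h; simp at h
  | cons b t ih =>
    intro j hj hg
    cases j with
    | zero =>
      simp only [List.getD_cons_zero] at hg
      subst hg
      simp [List.count_cons]
    | succ j =>
      simp only [List.getD_cons_succ] at hg
      have := ih j (by simpa using hj) hg
      simp only [List.set_cons_succ, List.count_cons]
      omega

-- pvCloseB written with squares equals the product form used by B
theorem pvCloseB_mul (p : List (List Int)) (i j : Nat) :
    (((p.getD i []).getD 0 0 - (p.getD j []).getD 0 0)
         * ((p.getD i []).getD 0 0 - (p.getD j []).getD 0 0)
       + ((p.getD i []).getD 1 0 - (p.getD j []).getD 1 0)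
         * ((p.getD i []).getD 1 0 - (p.getD j []).getD 1 0) ≤ 36)
    ↔ pvCloseB p i j = true := by
  simp only [pvCloseB, pvX, pvY, decide_eq_true_eq]
  constructor <;> intro h <;> nlinarith [h]

theorem dfsFold_spec (W : Int) (p : List (List Int)) (i : Nat) (hi : i < p.length) :
    ∀ (l : List Nat) (vs : List Bool) (st : List Nat),
      (∀ j ∈ l, j < p.length) → vs.length = p.length →
      (((l.foldl (pvPush p i) (vs, st)).1.length = vs.length)
      ∧ (∀ v, vs.getD v false = true → (l.foldl (pvPush p i) (vs, st)).1.getD v false = true)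
      ∧ (∀ v, (l.foldl (pvPush p i) (vs, st)).1.getD v false = true →
          vs.getD v false = true ∨ (v < p.length ∧ pvAdj p i v))
      ∧ (∀ v ∈ (l.foldl (pvPush p i) (vs, st)).2, v ∈ st ∨ (v < p.length ∧ pvAdj p i v))
      ∧ (∀ v ∈ st, v ∈ (l.foldl (pvPush p i) (vs, st)).2)
      ∧ ((∀ v ∈ st, vs.getD v false = true) →
          ∀ v ∈ (l.foldl (pvPush p i) (vs, st)).2,
            (l.foldl (pvPush p i) (vs, st)).1.getD v false = true)
      ∧ ((l.foldl (pvPush p i) (vs, st)).1.count false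
          + (l.foldl (pvPush p i) (vs, st)).2.length = vs.count false + st.length)
      ∧ (∀ v, (l.foldl (pvPush p i) (vs, st)).1.getD v false = true →
          vs.getD v false = false → v ∈ (l.foldl (pvPush p i) (vs, st)).2)
      ∧ (∀ j ∈ l, pvCloseB p i j = true →
          (l.foldl (pvPush p i) (vs, st)).1.getD j false = true)) := by
  intro l
  induction l with
  | nil =>
    intro vs st _ _
    refine ⟨rfl, fun v h => h, fun v h => Or.inl h, fun v h => Or.inl h, fun v h => h,
      fun h v hv => h v hv, rfl, ?_, ?_⟩
    · intro v h1 h2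
      have h1' : vs.getD v false = true := h1
      rw [h1'] at h2
      cases h2
    · intro j hj; exact absurd hj (List.not_mem_nil)
  | cons j l ih =>
    intro vs st hl hlen
    have hjp : j < p.length := hl j List.mem_cons_self
    have hjv : j < vs.length := hlen ▸ hjp
    have hl' : ∀ j' ∈ l, j' < p.length := fun j' h => hl j' (List.mem_cons_of_mem _ h)
    rw [List.foldl_cons]
    by_cases hvj : vs.getD j false = true
    · rw [show pvPush p i (vs, st) j = (vs, st) by simp only [pvPush]; rw [if_pos hvj]]
      obtain ⟨g1, g2, g3, g4, g5, g6, g7, g8, g9⟩ := ih vs st hl' hlen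
      refine ⟨g1, g2, g3, g4, g5, g6, g7, g8, ?_⟩
      intro j' hj' hc
      rcases List.mem_cons.mp hj' with rfl | h'
      · exact g2 _ hvj
      · exact g9 j' h' hc
    · by_cases hcl : ((p.getD i []).getD 0 0 - (p.getD j []).getD 0 0)
           * ((p.getD i []).getD 0 0 - (p.getD j []).getD 0 0)
         + ((p.getD i []).getD 1 0 - (p.getD j []).getD 1 0)
           * ((p.getD i []).getD 1 0 - (p.getD j []).getD 1 0) ≤ 36
      · rw [show pvPush p i (vs, st) j = (vs.set j true, j :: st) by
          simp only [pvPush]; rw [if_neg hvj, if_pos hcl]]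
        have hlen' : (vs.set j true).length = p.length := by
          rw [List.length_set]; exact hlen
        obtain ⟨g1, g2, g3, g4, g5, g6, g7, g8, g9⟩ := ih (vs.set j true) (j :: st) hl' hlen'
        have hadjj : pvAdj p i j := ⟨hi, hjp, (pvCloseB_mul p i j).mp hcl⟩
        have hset : ∀ v, (vs.set j true).getD v false = true →
            vs.getD v false = true ∨ v = j := by
          intro v hv
          by_cases hvj' : v = j
          · exact Or.inr hvj'
          · rw [getD_set_ne' _ _ _ _ _ hvj'] at hv; exact Or.inl hv
        have hsetj : (vs.set j true).getD j false = true := getD_set_self' _ _ _ _ hjv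
        refine ⟨by rw [g1, List.length_set], ?_, ?_, ?_, ?_, ?_, ?_, ?_, ?_⟩
        · intro v hv
          apply g2
          by_cases hvj' : v = j
          · subst hvj'; exact hsetj
          · rw [getD_set_ne' _ _ _ _ _ hvj']; exact hv
        · intro v hv
          rcases g3 v hv with h | h
          · rcases hset v h with h' | rfl
            · exact Or.inl h'
            · exact Or.inr ⟨hjp, hadjj⟩
          · exact Or.inr h
        · intro v hv
          rcases g4 v hv with h | h
          · rcases List.mem_cons.mp h with rfl | h'
            · exact Or.inr ⟨hjp, hadjj⟩
            · exact Or.inl h'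
          · exact Or.inr h
        · intro v hv
          exact g5 v (List.mem_cons_of_mem _ hv)
        · intro hst v hv
          apply g6 _ v hv
          intro v' hv'
          rcases List.mem_cons.mp hv' with rfl | h'
          · exact hsetj
          · by_cases hvj' : v' = j
            · subst hvj'; exact hsetj
            · rw [getD_set_ne' _ _ _ _ _ hvj']; exact hst v' h'
        · have := count_false_set vs j hjv (by
            cases h : vs.getD j false
            · rfl
            · exact absurd h hvj)
          rw [g7]
          simp only [List.length_cons]
          omega
        · intro v hv1 hv2
          by_cases hvj' : v = j
          · subst hvj'
            exact g5 _ List.mem_cons_self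
          · apply g8 v hv1
            rw [getD_set_ne' _ _ _ _ _ hvj']; exact hv2
        · intro j' hj' hc
          rcases List.mem_cons.mp hj' with rfl | h'
          · exact g2 _ hsetj
          · exact g9 j' h' hc
      · rw [show pvPush p i (vs, st) j = (vs, st) by
          simp only [pvPush]; rw [if_neg hvj, if_neg hcl]]
        obtain ⟨g1, g2, g3, g4, g5, g6, g7, g8, g9⟩ := ih vs st hl' hlen
        refine ⟨g1, g2, g3, g4, g5, g6, g7, g8, ?_⟩
        · intro j' hj' hc
          rcases List.mem_cons.mp hj' with rfl | h'
          · exact absurd ((pvCloseB_mul p i j').mpr hc) hcl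
          · exact g9 j' h' hc

theorem pvDfs_cases (W : Int) (p : List (List Int)) (n : Nat) :
    ∀ (fuel : Nat) (vs : List Bool) (st : List Nat),
      pvDfs W p n fuel vs st = "yes" ∨ pvDfs W p n fuel vs st = "no" := by
  intro fuel
  induction fuel with
  | zero =>
    intro vs st
    cases st <;> simp [pvDfs]
  | succ fuel ih =>
    intro vs st
    cases st with
    | nil => simp [pvDfs]
    | cons i rest =>
      rw [pvDfs]
      by_cases h : W - (p.getD i []).getD 1 0 ≤ 5
      · rw [if_pos h]; exact Or.inr rfl
      · rw [if_neg h]; exact ih _ _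

theorem pvDfs_no_sound (W : Int) (p : List (List Int)) :
    ∀ (fuel : Nat) (vs : List Bool) (st : List Nat),
      vs.length = p.length →
      (∀ v ∈ st, vs.getD v false = true) →
      (∀ v, vs.getD v false = true → v < p.length ∧ pvRB p v) →
      pvDfs W p p.length fuel vs st = "no" → pvConn W p := by
  intro fuel
  induction fuel with
  | zero =>
    intro vs st _ _ _ hres
    cases st <;> simp [pvDfs] at hres
  | succ fuel ih =>
    intro vs st hlen hstv hvis hres
    cases st with
    | nil => simp [pvDfs] at hres
    | cons i rest =>
      rw [pvDfs] at hres
      by_cases htop : W - (p.getD i []).getD 1 0 ≤ 5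
      · obtain ⟨hiN, hiRB⟩ := hvis i (hstv i List.mem_cons_self)
        exact pvRB_RT_conn hiRB ⟨i, ⟨hiN, htop⟩, Relation.ReflTransGen.refl⟩
      · rw [if_neg htop] at hres
        obtain ⟨hiN, hiRB⟩ := hvis i (hstv i List.mem_cons_self)
        obtain ⟨g1, g2, g3, g4, g5, g6, g7, g8, g9⟩ :=
          dfsFold_spec W p i hiN (List.range p.length) vs rest
            (fun j hj => List.mem_range.mp hj) hlen
        refine ih _ _ (by rw [g1]; exact hlen) ?_ ?_ hres
        · exact g6 (fun v hv => hstv v (List.mem_cons_of_mem _ hv))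
        · intro v hv
          rcases g3 v hv with h | ⟨hvN, hadj⟩
          · exact hvis v h
          · exact ⟨hvN, pvRB_mono hiRB (Relation.ReflTransGen.single hadj)⟩

theorem dfs_closed_conn_false {W : Int} {p : List (List Int)} {vs : List Bool}
    (hS : ∀ v, pvBot p v → vs.getD v false = true)
    (hcl : ∀ x, x < p.length → vs.getD x false = true →
      (¬(W - pvY p x ≤ 5)) ∧ ∀ y, y < p.length → pvCloseB p x y = true →
        vs.getD y false = true)
    (hP : pvConn W p) : False := by
  obtain ⟨i, j, hb, ht, hr⟩ := hP
  have hvj : ∀ x, pvReach p i x → vs.getD x false = true := by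
    intro x hx
    induction hx with
    | refl => exact hS i hb
    | tail _ hadj ih =>
      obtain ⟨h1, h2, h3⟩ := hadj
      exact (hcl _ h1 ih).2 _ h2 h3
  exact (hcl j ht.1 (hvj j hr)).1 ht.2

theorem pvDfs_no_complete (W : Int) (p : List (List Int)) :
    ∀ (fuel : Nat) (vs : List Bool) (st : List Nat),
      vs.length = p.length →
      vs.count false + st.length ≤ fuel →
      (∀ v ∈ st, vs.getD v false = true) →
      (∀ x, x < p.length → vs.getD x false = true → x ∉ st →
        (¬(W - pvY p x ≤ 5)) ∧ ∀ y, y < p.length → pvCloseB p x y = true →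
          vs.getD y false = true) →
      (∀ v, pvBot p v → vs.getD v false = true) →
      pvConn W p →
      pvDfs W p p.length fuel vs st = "no" := by
  intro fuel
  induction fuel with
  | zero =>
    intro vs st hlen hfuel hstv hG hS hP
    have hst : st = [] := by
      cases st with
      | nil => rfl
      | cons a l => simp at hfuel
    subst hst
    exact absurd hP (fun hP => dfs_closed_conn_false hS
      (fun x hx hv => hG x hx hv (List.not_mem_nil)) hP)
  | succ fuel ih =>
    intro vs st hlen hfuel hstv hG hS hP
    cases st with
    | nil =>
      exact absurd hP (fun hP => dfs_closed_conn_false hS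
        (fun x hx hv => hG x hx hv (List.not_mem_nil)) hP)
    | cons i rest =>
      rw [pvDfs]
      by_cases htop : W - (p.getD i []).getD 1 0 ≤ 5
      · rw [if_pos htop]
      · rw [if_neg htop]
        have hiN : i < p.length := (by
          by_contra hcon
          have := hstv i List.mem_cons_self
          rw [List.getD_eq_default] at this
          · cases this
          · omega)
        obtain ⟨g1, g2, g3, g4, g5, g6, g7, g8, g9⟩ :=
          dfsFold_spec W p i hiN (List.range p.length) vs rest
            (fun j hj => List.mem_range.mp hj) hlen
        apply ih
        · rw [g1]; exact hlen
        · simp only [List.length_cons] at hfuel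
          omega
        · exact g6 (fun v hv => hstv v (List.mem_cons_of_mem _ hv))
        · intro x hx hvx hxs
          by_cases hold : vs.getD x false = true
          · by_cases hxi : x = i
            · subst hxi
              refine ⟨htop, fun y hy hc => g9 y (List.mem_range.mpr hy) hc⟩
            · have hxst : x ∉ (i :: rest) := by
                intro hmem
                rcases List.mem_cons.mp hmem with h | h
                · exact hxi h
                · exact hxs (g5 x h)
              obtain ⟨ha, hb⟩ := hG x hx hold hxst
              exact ⟨ha, fun y hy hc => g2 y (hb y hy hc)⟩
          · exfalso
            apply hxs
            apply g8 x hvx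
            cases h : vs.getD x false
            · rfl
            · exact absurd h hold
        · intro v hv
          exact g2 v (hS v hv)
        · exact hP

theorem B_char (L W : Int) (p : List (List Int)) :
    (drivingProblem_alt L W p = "no" ↔ pvConn W p)
    ∧ (drivingProblem_alt L W p = "no" ∨ drivingProblem_alt L W p = "yes") := by
  set vs := p.map (fun q => decide (q.getD 1 0 ≤ 5)) with hvs
  set st := ((List.range p.length).filter (fun i => vs.getD i false)).reverse with hst
  have hlen : vs.length = p.length := by rw [hvs, List.length_map]
  have hget : ∀ v, vs.getD v false = true ↔ (v < p.length ∧ pvY p v ≤ 5) := by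
    intro v
    by_cases hv : v < p.length
    · rw [hvs]
      simp [List.getD, List.getElem?_map, List.getElem?_eq_getElem hv, pvY,
        List.getD, List.getElem?_eq_getElem hv]
      intro _
      exact hv
    · rw [List.getD_eq_default _ _ (by omega : vs.length ≤ v)]
      simp
      omega
  have hmem : ∀ v, v ∈ st ↔ vs.getD v false = true := by
    intro v
    rw [hst, List.mem_reverse, List.mem_filter, List.mem_range]
    constructor
    · rintro ⟨-, h⟩; exact h
    · intro h; exact ⟨((hget v).mp h).1, h⟩
  have hres : drivingProblem_alt L W p
      = pvDfs W p p.length (vs.count false + st.length) vs st := rfl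
  constructor
  · constructor
    · intro h
      refine pvDfs_no_sound W p _ vs st hlen (fun v hv => (hmem v).mp hv) ?_ (hres ▸ h)
      intro v hv
      obtain ⟨h1, h2⟩ := (hget v).mp hv
      exact ⟨h1, v, ⟨h1, h2⟩, Relation.ReflTransGen.refl⟩
    · intro hP
      rw [hres]
      apply pvDfs_no_complete W p _ vs st hlen le_rfl (fun v hv => (hmem v).mp hv)
      · intro x hx hvx hxs
        exact absurd ((hmem x).mpr hvx) hxs
      · intro v hv
        exact (hget v).mpr ⟨hv.1, hv.2⟩
      · exact hP
  · rw [hres]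
    rcases pvDfs_cases W p p.length (vs.count false + st.length) vs st with h | h
    · exact Or.inr h
    · exact Or.inl h

theorem main_equiv (L W : Int) (p : List (List Int)) :
    drivingProblem L W p = drivingProblem_alt L W p := by
  obtain ⟨hA, hAc⟩ := A_char L W p
  obtain ⟨hB, hBc⟩ := B_char L W p
  by_cases hP : pvConn W p
  · rw [hA.mpr (conn_to_eqvGen hP), hB.mpr hP]
  · have hA' : drivingProblem L W p = "yes" := by
      rcases hAc with h | h
      · exact absurd (eqvGen_to_conn (hA.mp h)) hP
      · exact h
    have hB' : drivingProblem_alt L W p = "yes" := by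
      rcases hBc with h | h
      · exact absurd (hB.mp h) hP
      · exact h
    rw [hA', hB']

-- ===== VERDICT (by name: the statement is the Claim_ definition above) =====
theorem drivingProblem_spec : Claim_equal_drivingProblem := by
  intro L W p _ _
  unfold Spec_drivingProblem
  exact main_equiv L W p
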